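-- pv_equiv track=rewrite | github.com/DCoderGH/openchemvault | flaskapp/process/formula_util.py | formula_distance
-- ===== SOURCE A (Python) =====
-- def formula_distance(query_formula, data_record_formula):
--     dist = 0
--     for k in data_record_formula:
--         if k not in query_formula:
--             dist += 1000
--         else:
--             dist += abs(data_record_formula[k] - query_formula[k])
--     return dist
-- ===== SOURCE B (Python) =====
-- def formula_distance(query_formula, data_record_formula):
--     dist = 1000 * len(data_record_formula)
--     for k, qv in query_formula.items():
--         if k in data_record_formula:
--             dist += abs(data_record_formula[k] - qv) - 1000
--     return dist
-- ===== Notes on version B (the rewrite author's own statement) =====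
-- stated objective: alternative
-- what changed: B reverses the traversal: instead of A's loop over the data record's keys branching on query membership, B starts from the full penalty 1000*len(data_record_formula) and makes a single pass over the QUERY, correcting each shared key's penalty to the absolute value difference.
import Mathlib
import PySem

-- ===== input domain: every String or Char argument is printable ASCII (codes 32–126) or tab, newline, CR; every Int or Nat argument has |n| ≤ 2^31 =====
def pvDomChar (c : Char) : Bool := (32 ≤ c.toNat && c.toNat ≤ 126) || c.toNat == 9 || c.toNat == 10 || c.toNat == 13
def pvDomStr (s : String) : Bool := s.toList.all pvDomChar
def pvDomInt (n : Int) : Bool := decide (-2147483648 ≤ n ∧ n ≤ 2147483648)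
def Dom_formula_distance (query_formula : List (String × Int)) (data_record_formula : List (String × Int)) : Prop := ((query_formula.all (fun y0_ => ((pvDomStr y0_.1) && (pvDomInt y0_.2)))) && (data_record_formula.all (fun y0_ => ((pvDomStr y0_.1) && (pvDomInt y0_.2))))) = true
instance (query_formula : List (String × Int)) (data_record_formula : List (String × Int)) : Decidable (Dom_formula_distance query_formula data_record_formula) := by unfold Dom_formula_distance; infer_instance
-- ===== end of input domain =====

-- B reverses the traversal: it starts from the full penalty 1000*len(data) and a single
-- pass over the QUERY corrects each shared key's penalty to the |value difference|
-- (objective: alternative decomposition, same cost).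

-- ===== PORT A =====
-- 'for k in data_record_formula': fold over the dict's entries, branching on membership;
-- 'data_record_formula[k]' is first-match lookup (the '.getD 0' default is unreachable,
-- since k is a key of data_record_formula itself).
def formula_distance (query_formula : List (String × Int)) (data_record_formula : List (String × Int)) : Int :=
  data_record_formula.foldl
    (fun dist kv =>
      match List.lookup kv.1 query_formula with
      | none => dist + 1000
      | some qv => dist + |((List.lookup kv.1 data_record_formula).getD 0) - qv|)
    0

-- ===== PORT B =====
-- 'dist = 1000 * len(data)', then 'for k, qv in query.items(): if k in data: dist += abs(data[k] - qv) - 1000';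
-- the membership test + lookup is the match on the first-match lookup.
def formula_distance_alt (query_formula : List (String × Int)) (data_record_formula : List (String × Int)) : Int :=
  query_formula.foldl
    (fun dist kv =>
      match List.lookup kv.1 data_record_formula with
      | some dv => dist + (|dv - kv.2| - 1000)
      | none => dist)
    (1000 * (data_record_formula.length : Int))

-- ===== PRECONDITION & SPEC =====
-- Pre_ excludes association lists with duplicate keys in either argument: both arguments
-- of A are Python dicts (whose keys are unique), and a duplicate-key list does not
-- represent a dict (dict construction keeps the LAST value, first-match lookup the first).
def Pre_formula_distance (query_formula : List (String × Int)) (data_record_formula : List (String × Int)) : Prop :=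
  (query_formula.map Prod.fst).Nodup ∧ (data_record_formula.map Prod.fst).Nodup
instance (query_formula : List (String × Int)) (data_record_formula : List (String × Int)) : Decidable (Pre_formula_distance query_formula data_record_formula) := by unfold Pre_formula_distance; infer_instance
def pvWitness_formula_distance : (List (String × Int)) × (List (String × Int)) :=
  ([("H", 2), ("O", 1)], [("H", 3), ("C", 4)])
def Spec_formula_distance (query_formula : List (String × Int)) (data_record_formula : List (String × Int)) (out : Int) : Prop := out = formula_distance_alt query_formula data_record_formula
instance (query_formula : List (String × Int)) (data_record_formula : List (String × Int)) (out : Int) : Decidable (Spec_formula_distance query_formula data_record_formula out) := by unfold Spec_formula_distance; infer_instance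

-- ===== CLAIM (what is proved, stated in full; the proofs are below) =====
def Claim_equal_formula_distance : Prop := ∀ (query_formula : List (String × Int)) (data_record_formula : List (String × Int)), Dom_formula_distance query_formula data_record_formula → Pre_formula_distance query_formula data_record_formula → Spec_formula_distance query_formula data_record_formula (formula_distance query_formula data_record_formula)

-- ===== LEMMAS AND PROOFS =====

-- the common per-key correction: 0 unless the key is in both dicts
def fdCorr (q d : List (String × Int)) (k : String) : Int :=
  match List.lookup k q, List.lookup k d with
  | some qv, some dv => |dv - qv| - 1000
  | _, _ => 0

theorem fd_lookup_none_iff (q : List (String × Int)) (k : String) :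
    List.lookup k q = none ↔ k ∉ q.map Prod.fst := by
  induction q with
  | nil => simp
  | cons p t ih =>
    by_cases h : k = p.1
    · subst h; simp [List.lookup]
    · have hbe : (k == p.1) = false := by simp [h]
      simp [List.lookup, hbe, ih, h]

theorem fd_lookup_self {d : List (String × Int)} (hnd : (d.map Prod.fst).Nodup)
    {kv : String × Int} (hkv : kv ∈ d) : List.lookup kv.1 d = some kv.2 := by
  induction d with
  | nil => cases hkv
  | cons p t ih =>
    simp only [List.map_cons, List.nodup_cons] at hnd
    cases hkv with
    | head => simp [List.lookup]
    | tail _ h =>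
      have hne : kv.1 ≠ p.1 := fun he =>
        hnd.1 (he ▸ (List.mem_map.mpr ⟨kv, h, rfl⟩))
      have hbe : (kv.1 == p.1) = false := by simp [hne]
      simp only [List.lookup, hbe]
      exact ih hnd.2 h

-- A's branching fold = full penalty + correction per data entry
theorem fd_A_eq (q d : List (String × Int)) (hnd : (d.map Prod.fst).Nodup) :
    formula_distance q d
      = 1000 * (d.length : Int) + ((d.map Prod.fst).map (fdCorr q d)).sum := by
  unfold formula_distance
  have hstep : d.foldl
      (fun dist kv =>
        match List.lookup kv.1 q with
        | none => dist + 1000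
        | some qv => dist + |((List.lookup kv.1 d).getD 0) - qv|) 0
      = d.foldl (fun dist kv => dist + (1000 + fdCorr q d kv.1)) 0 := by
    apply PySem.List.foldl_congr_mem
    intro acc kv hkv
    have hd : List.lookup kv.1 d = some kv.2 := fd_lookup_self hnd hkv
    unfold fdCorr
    cases hq : List.lookup kv.1 q with
    | none => simp
    | some qv => simp [hd]
  rw [hstep, PySem.List.foldl_add d (fun kv => 1000 + fdCorr q d kv.1) 0,
    PySem.List.sum_map_add_int d (fun _ => (1000 : Int)) (fun kv => fdCorr q d kv.1),
    PySem.List.sum_map_const_int d 1000, List.map_map]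
  rw [List.map_congr_left (f := fdCorr q d ∘ Prod.fst)
    (g := fun kv : String × Int => fdCorr q d kv.1) (fun _ _ => rfl)]
  ring

-- B's corrective fold = full penalty + correction per query entry
theorem fd_B_eq (q d : List (String × Int)) (hnq : (q.map Prod.fst).Nodup) :
    formula_distance_alt q d
      = 1000 * (d.length : Int) + ((q.map Prod.fst).map (fdCorr q d)).sum := by
  unfold formula_distance_alt
  have hstep : q.foldl
      (fun dist kv =>
        match List.lookup kv.1 d with
        | some dv => dist + (|dv - kv.2| - 1000)
        | none => dist) (1000 * (d.length : Int))
      = q.foldl (fun dist kv => dist + fdCorr q d kv.1) (1000 * (d.length : Int)) := by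
    apply PySem.List.foldl_congr_mem
    intro acc kv hkv
    have hq : List.lookup kv.1 q = some kv.2 := fd_lookup_self hnq hkv
    unfold fdCorr
    cases hd : List.lookup kv.1 d with
    | none => simp
    | some dv => simp [hq]
  rw [hstep, PySem.List.foldl_add q (fun kv => fdCorr q d kv.1) (1000 * (d.length : Int)),
    List.map_map]
  rw [List.map_congr_left (f := fdCorr q d ∘ Prod.fst)
    (g := fun kv : String × Int => fdCorr q d kv.1) (fun _ _ => rfl)]

-- the correction sums over the two (distinct) key lists agree: fdCorr vanishes off the
-- intersection, so both equal the Finset sum over the common keys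
theorem fd_sum_corr_eq (q d : List (String × Int))
    (hnq : (q.map Prod.fst).Nodup) (hnd : (d.map Prod.fst).Nodup) :
    ((d.map Prod.fst).map (fdCorr q d)).sum = ((q.map Prod.fst).map (fdCorr q d)).sum := by
  rw [← List.sum_toFinset _ hnd, ← List.sum_toFinset _ hnq]
  have hvanish : ∀ k : String, k ∉ (q.map Prod.fst).toFinset ∨ k ∉ (d.map Prod.fst).toFinset →
      fdCorr q d k = 0 := by
    intro k hk
    unfold fdCorr
    cases hk with
    | inl h =>
      have : List.lookup k q = none := (fd_lookup_none_iff q k).mpr (by simpa using h)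
      simp [this]
    | inr h =>
      have : List.lookup k d = none := (fd_lookup_none_iff d k).mpr (by simpa using h)
      cases List.lookup k q <;> simp [this]
  have h1 : ∑ k ∈ (d.map Prod.fst).toFinset, fdCorr q d k
      = ∑ k ∈ (d.map Prod.fst).toFinset ∩ (q.map Prod.fst).toFinset, fdCorr q d k := by
    symm
    apply Finset.sum_subset Finset.inter_subset_left
    intro k hkd hki
    apply hvanish
    left
    intro hkq
    exact hki (Finset.mem_inter.mpr ⟨hkd, hkq⟩)
  have h2 : ∑ k ∈ (q.map Prod.fst).toFinset, fdCorr q d k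
      = ∑ k ∈ (d.map Prod.fst).toFinset ∩ (q.map Prod.fst).toFinset, fdCorr q d k := by
    symm
    rw [Finset.inter_comm]
    apply Finset.sum_subset Finset.inter_subset_left
    intro k hkq hki
    apply hvanish
    right
    intro hkd
    exact hki (Finset.mem_inter.mpr ⟨hkq, hkd⟩)
  rw [h1, h2]

-- ===== VERDICT (by name: the statement is the Claim_ definition above) =====
theorem formula_distance_spec : Claim_equal_formula_distance := by
  intro q d _ hpre
  show formula_distance q d = formula_distance_alt q d
  rw [fd_A_eq q d hpre.2, fd_B_eq q d hpre.1, fd_sum_corr_eq q d hpre.1 hpre.2]
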